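-- pv_equiv track=rewrite | github.com/godzzn2020/SoftTeacherDrift | scripts/summarize_next_stage_v14.py | join_metrics
-- ===== SOURCE A (Python) =====
-- from typing import Any, Dict, List, Optional, Tuple
--
-- def join_metrics(trackal_rows: List[Dict[str, str]], trackam_rows: List[Dict[str, str]]) -> List[Dict[str, Any]]:
--     # 将 Track AM 的诊断列按 (group,dataset,phase) 左连接到 Track AL
--     am_map: Dict[Tuple[str, str, str], Dict[str, str]] = {}
--     for r in trackam_rows:
--         key = (str(r.get("group") or ""), str(r.get("dataset") or ""), str(r.get("phase") or ""))
--         am_map[key] = r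
--
--     out: List[Dict[str, Any]] = []
--     for r in trackal_rows:
--         key = (str(r.get("group") or ""), str(r.get("dataset") or ""), str(r.get("phase") or ""))
--         merged: Dict[str, Any] = dict(r)
--         am = am_map.get(key)
--         if am:
--             for k, v in am.items():
--                 if k in {"track", "group", "dataset", "phase"}:
--                     continue
--                 merged[f"AM_{k}"] = v
--         out.append(merged)
--     return out
-- ===== SOURCE B (Python) =====
-- from typing import Any, Dict, List, Optional, Tuple
--
-- _SKIP = {"track", "group", "dataset", "phase"}
--
-- def _key(r: Dict[str, str]) -> Tuple[str, str, str]: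
--     return (str(r.get("group") or ""), str(r.get("dataset") or ""), str(r.get("phase") or ""))
--
-- def join_metrics(trackal_rows: List[Dict[str, str]], trackam_rows: List[Dict[str, str]]) -> List[Dict[str, Any]]:
--     # No hash index: for each AL row, scan the AM rows backwards for the last
--     # row with the same key (dict-overwrite last-wins), then merge.
--     out: List[Dict[str, Any]] = []
--     for r in trackal_rows:
--         k = _key(r)
--         am = next((c for c in reversed(trackam_rows) if _key(c) == k), None)
--         merged: Dict[str, Any] = dict(r)
--         if am:
--             merged.update((f"AM_{n}", v) for n, v in am.items() if n not in _SKIP)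
--         out.append(merged)
--     return out
-- ===== Notes on version B (the rewrite author's own statement) =====
-- stated objective: alternative
-- what changed: Drops A's prebuilt am_map hash index entirely: for each AL row B scans the AM rows in reverse for the last key match (next over reversed), and merges via dict.update of a filtered generator instead of a loop with continue.
import Mathlib
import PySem

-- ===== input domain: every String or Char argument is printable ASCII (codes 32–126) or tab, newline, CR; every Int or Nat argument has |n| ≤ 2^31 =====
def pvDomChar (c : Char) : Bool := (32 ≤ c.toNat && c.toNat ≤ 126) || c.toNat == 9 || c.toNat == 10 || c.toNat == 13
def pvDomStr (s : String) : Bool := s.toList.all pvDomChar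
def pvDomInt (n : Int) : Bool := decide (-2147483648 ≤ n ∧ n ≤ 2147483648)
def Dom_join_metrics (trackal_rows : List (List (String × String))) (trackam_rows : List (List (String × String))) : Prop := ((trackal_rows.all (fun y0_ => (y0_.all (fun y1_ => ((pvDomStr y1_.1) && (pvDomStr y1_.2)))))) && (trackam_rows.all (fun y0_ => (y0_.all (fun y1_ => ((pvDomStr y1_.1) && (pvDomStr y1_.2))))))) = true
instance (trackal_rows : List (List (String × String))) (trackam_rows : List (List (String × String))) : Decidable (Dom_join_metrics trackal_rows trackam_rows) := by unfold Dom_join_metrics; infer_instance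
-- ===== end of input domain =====

-- B drops A's prebuilt am_map hash index: per AL row it scans the AM rows in reverse
-- for the last key match and merges via a filtered update (alternative decomposition, not faster).


-- ===== PORT A =====
-- key = (str(r.get("group") or ""), str(r.get("dataset") or ""), str(r.get("phase") or "")); values are strings, so 'or ""' only replaces a missing key (None) by "" — exactly getD with default ""
def pvKeyA (r : List (String × String)) : String × String × String :=
  let d := PySem.Dict.mk r
  (d.getD "group" "", d.getD "dataset" "", d.getD "phase" "")

def join_metrics (trackal_rows : List (List (String × String))) (trackam_rows : List (List (String × String))) : List (List (String × String)) :=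
  let am_map := trackam_rows.foldl (fun m r => m.insert (pvKeyA r) r)
      (PySem.Dict.empty : PySem.Dict (String × String × String) (List (String × String)))
  trackal_rows.foldl (fun out r =>
    let merged : PySem.Dict String String := PySem.Dict.mk r
    let merged :=
      match am_map.get? (pvKeyA r) with
      | some a =>
        if a ≠ [] then  -- 'if am:' (a present and truthy, i.e. non-empty dict)
          a.foldl (fun (m : PySem.Dict String String) (kv : String × String) =>
            if kv.1 ∈ (["track", "group", "dataset", "phase"] : List String) then m
            else m.insert ("AM_" ++ kv.1) kv.2) merged
        else merged
      | none => merged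
    out ++ [merged.items]) []

-- ===== PORT B =====
def pvSkip : List String := ["track", "group", "dataset", "phase"]

def pvKeyB (r : List (String × String)) : String × String × String :=
  ((PySem.Dict.mk r).getD "group" "", (PySem.Dict.mk r).getD "dataset" "", (PySem.Dict.mk r).getD "phase" "")

def join_metrics_alt (trackal_rows : List (List (String × String))) (trackam_rows : List (List (String × String))) : List (List (String × String)) :=
  trackal_rows.map (fun r =>
    let k := pvKeyB r
    -- next((c for c in reversed(trackam_rows) if _key(c) == k), None)
    let am := trackam_rows.reverse.find? (fun c => pvKeyB c == k)
    let merged := PySem.Dict.mk r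
    (match am with
     | some a =>
       if a.isEmpty then merged
       else (a.filter (fun (kv : String × String) => !(pvSkip.contains kv.1))).foldl
              (fun (m : PySem.Dict String String) (kv : String × String) => m.insert ("AM_" ++ kv.1) kv.2) merged
     | none => merged).items)

-- ===== PRECONDITION & SPEC =====
def Spec_join_metrics (trackal_rows : List (List (String × String))) (trackam_rows : List (List (String × String))) (out : List (List (String × String))) : Prop := out = join_metrics_alt trackal_rows trackam_rows
instance (trackal_rows : List (List (String × String))) (trackam_rows : List (List (String × String))) (out : List (List (String × String))) : Decidable (Spec_join_metrics trackal_rows trackam_rows out) := by unfold Spec_join_metrics; infer_instance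

-- ===== CLAIM (what is proved, stated in full; the proofs are below) =====
def Claim_equal_join_metrics : Prop := ∀ (trackal_rows : List (List (String × String))) (trackam_rows : List (List (String × String))), Dom_join_metrics trackal_rows trackam_rows → Spec_join_metrics trackal_rows trackam_rows (join_metrics trackal_rows trackam_rows)

-- ===== LEMMAS AND PROOFS =====

theorem pvKey_eq (r : List (String × String)) : pvKeyB r = pvKeyA r := rfl

-- the hash index built by A answers each lookup with the LAST matching AM row,
-- which is exactly B's reverse scan
theorem pvIndex_eq_revFind (am : List (List (String × String)))
    (d : PySem.Dict (String × String × String) (List (String × String)))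
    (k : String × String × String) :
    (am.foldl (fun m r => m.insert (pvKeyA r) r) d).get? k =
      (match am.reverse.find? (fun c => pvKeyA c == k) with
       | some a => some a
       | none => d.get? k) := by
  induction am generalizing d with
  | nil => simp
  | cons a t ih =>
    rw [List.foldl_cons, ih, List.reverse_cons, List.find?_append]
    cases h : t.reverse.find? (fun c => pvKeyA c == k) with
    | some a' => simp
    | none =>
      by_cases hk : pvKeyA a == k
      · have hkk : k = pvKeyA a := (beq_iff_eq.mp hk).symm
        simp [hkk]
      · have hne : k ≠ pvKeyA a := fun h' => hk (beq_iff_eq.mpr h'.symm)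
        simp [hk, PySem.Dict.get?_insert_of_ne _ _ hne]

-- A's skip-and-insert loop is B's filter-then-insert loop
theorem pvMerge_eq (a : List (String × String)) (m : PySem.Dict String String) :
    a.foldl (fun (m : PySem.Dict String String) (kv : String × String) =>
        if kv.1 ∈ (["track", "group", "dataset", "phase"] : List String) then m
        else m.insert ("AM_" ++ kv.1) kv.2) m =
      (a.filter (fun (kv : String × String) => !(pvSkip.contains kv.1))).foldl
        (fun (m : PySem.Dict String String) (kv : String × String) => m.insert ("AM_" ++ kv.1) kv.2) m := by
  induction a generalizing m with
  | nil => rfl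
  | cons kv t ih =>
    rw [List.foldl_cons, List.filter_cons]
    by_cases h : kv.1 ∈ (["track", "group", "dataset", "phase"] : List String)
    · have hc : pvSkip.contains kv.1 = true := by simpa [pvSkip] using h
      rw [if_pos h, hc]
      simpa using ih m
    · have hc : pvSkip.contains kv.1 = false := by simpa [pvSkip] using h
      rw [if_neg h, hc]
      simpa using ih (m.insert ("AM_" ++ kv.1) kv.2)

-- ===== VERDICT (by name: the statement is the Claim_ definition above) =====
theorem join_metrics_spec : Claim_equal_join_metrics := by
  intro al am _
  unfold Spec_join_metrics join_metrics join_metrics_alt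
  rw [PySem.List.foldl_append_singleton_eq_map]
  apply List.map_congr_left
  intro r _
  simp only [pvKey_eq]
  rw [pvIndex_eq_revFind]
  cases h : am.reverse.find? (fun c => pvKeyA c == pvKeyA r) with
  | none => rfl
  | some a =>
    cases a with
    | nil => rfl
    | cons kv t => exact congrArg PySem.Dict.items (pvMerge_eq (kv :: t) (PySem.Dict.mk r))
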